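-- pv_equiv track=rewrite | github.com/Saurabhkumar726/Coding-Practice | LeetCode/2026-04-17_minimum-absolute-distance-between-mirror-pairs.py | minMirrorPairDistance
-- ===== SOURCE A (Python) =====
-- from typing import List
--
-- def minMirrorPairDistance(nums: List[int]) -> int:
--     def reverse(x):
--         return int(str(x)[::-1])
--
--     pos = {}
--     ans = float('inf')
--
--     for i, x in enumerate(nums):
--         # Check if current matches reverse of previous numbers
--         if x in pos:
--             ans = min(ans, i - pos[x])
--
--         rev = reverse(x)
--         pos[rev] = i  # store reversed value
--
--     return ans if ans != float('inf') else -1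
-- ===== SOURCE B (Python) =====
-- def minMirrorPairDistance(nums):
--     def reverse(x):
--         return int(str(x)[::-1])
--
--     ans = float('inf')
--     for i in range(len(nums)):
--         for j in range(i):
--             if reverse(nums[j]) == nums[i]:
--                 ans = min(ans, i - j)
--     return ans if ans != float('inf') else -1
-- ===== Notes on version B (the rewrite author's own statement) =====
-- stated objective: simpler
-- what changed: Replaced the single pass that maintains a dict from reversed values to their latest index by a plain nested double loop that, for each index i, rescans all earlier indices j and compares reverse(nums[j]) with nums[i].
import Mathlib
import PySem

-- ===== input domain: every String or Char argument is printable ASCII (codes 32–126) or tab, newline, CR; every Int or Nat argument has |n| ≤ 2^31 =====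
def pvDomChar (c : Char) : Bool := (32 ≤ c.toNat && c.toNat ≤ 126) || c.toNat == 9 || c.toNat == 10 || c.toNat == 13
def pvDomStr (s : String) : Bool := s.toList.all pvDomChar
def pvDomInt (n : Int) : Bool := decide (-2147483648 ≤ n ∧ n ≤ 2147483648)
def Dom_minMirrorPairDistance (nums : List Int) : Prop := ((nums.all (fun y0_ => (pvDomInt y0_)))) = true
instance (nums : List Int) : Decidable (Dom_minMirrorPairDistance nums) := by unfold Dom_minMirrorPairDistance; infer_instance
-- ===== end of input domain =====

-- B replaces A's dict of latest reversed-value indices by a plain nested double loop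
-- rescanning all earlier indices (objective: simpler); equivalence is about return values.

-- ===== PORT A =====
-- reverse(x) = int(str(x)[::-1]); exact for x ≥ 0. For x < 0 Python raises ValueError
-- (excluded by Pre_); there the Option is none and we take the junk default 0.
def pyRevInt (x : Int) : Int :=
  (((PySem.Str.slice? (PySem.Int.toStr x) none none (-1)).bind PySem.Int.ofStr?).getD 0)

-- Python's min(ans, v) where ans starts as float('inf'), modelled as Option Int (none = inf)
def pyMinInf (ans : Option Int) (v : Int) : Option Int :=
  some (match ans with | none => v | some a => min a v)

-- the body of A's 'for i, x in enumerate(nums)' loop; state = (pos, ans)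
def stepA (st : PySem.Dict Int Int × Option Int) (p : Int × Int) :
    PySem.Dict Int Int × Option Int :=
  let pos := st.1
  let ans := match pos.get? p.2 with
    | some j => pyMinInf st.2 (p.1 - j)
    | none => st.2
  (pos.insert (pyRevInt p.2) p.1, ans)

def minMirrorPairDistance (nums : List Int) : Int :=
  match ((PySem.List.enumerate nums).foldl stepA (PySem.Dict.empty, none)).2 with
  | some a => a
  | none => -1

-- ===== PORT B =====
-- the body of B's inner 'for j in range(i)' loop
def innerB (nums : List Int) (i : Int) (ans : Option Int) : Option Int :=
  (PySem.List.pyRange 0 i).foldl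
    (fun ans j =>
      if pyRevInt (PySem.List.pyGetD nums j 0) = PySem.List.pyGetD nums i 0 then
        pyMinInf ans (i - j)
      else ans)
    ans

def minMirrorPairDistance_alt (nums : List Int) : Int :=
  match (PySem.List.pyRange 0 (nums.length : Int)).foldl (fun ans i => innerB nums i ans) none with
  | some a => a
  | none => -1

-- ===== PRECONDITION & SPEC =====
-- Pre_ excludes exactly the inputs where A raises: reverse(x) = int(str(x)[::-1]) raises
-- ValueError for any negative element ('21-').
def Pre_minMirrorPairDistance (nums : List Int) : Prop := ∀ x ∈ nums, 0 ≤ x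
instance (nums : List Int) : Decidable (Pre_minMirrorPairDistance nums) := by
  unfold Pre_minMirrorPairDistance; infer_instance

def pvWitness_minMirrorPairDistance : List Int := [12, 21, 5, 21]

def Spec_minMirrorPairDistance (nums : List Int) (out : Int) : Prop :=
  out = minMirrorPairDistance_alt nums
instance (nums : List Int) (out : Int) : Decidable (Spec_minMirrorPairDistance nums out) := by
  unfold Spec_minMirrorPairDistance; infer_instance

-- ===== CLAIM (what is proved, stated in full; the proofs are below) =====
def Claim_equal_minMirrorPairDistance : Prop :=
  ∀ (nums : List Int), Dom_minMirrorPairDistance nums → Pre_minMirrorPairDistance nums →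
    Spec_minMirrorPairDistance nums (minMirrorPairDistance nums)

-- ===== LEMMAS AND PROOFS =====

-- last index j of ys with pyRevInt ys[j] = v (what A's dict stores for key v)
def lastIdx (ys : List Int) (v : Int) : Option Int :=
  (PySem.List.enumerate ys).foldl (fun acc p => if pyRevInt p.2 = v then some p.1 else acc) none

theorem lastIdx_append (ys : List Int) (x v : Int) :
    lastIdx (ys ++ [x]) v = if pyRevInt x = v then some (ys.length : Int) else lastIdx ys v := by
  simp [lastIdx, PySem.List.enumerate_append, List.foldl_append, PySem.List.enumerate]

theorem lastIdx_bounds (ys : List Int) (v j : Int) (h : lastIdx ys v = some j) :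
    0 ≤ j ∧ j < (ys.length : Int) := by
  induction ys using List.reverseRecOn with
  | nil => simp [lastIdx, PySem.List.enumerate] at h
  | append_singleton ys x ih =>
    rw [lastIdx_append] at h
    split at h
    · cases h; constructor <;> simp
    · have := ih h; simp; omega

theorem pyMinInf_absorb (ans : Option Int) (d e : Int) (h : e ≤ d) :
    pyMinInf (pyMinInf ans d) e = pyMinInf ans e := by
  cases ans <;> simp [pyMinInf] <;> omega

-- A's dict after the pass over ys maps each value v to the last index whose reverse is v
theorem dictA_spec (ys : List Int) (v : Int) :
    ((PySem.List.enumerate ys).foldl stepA (PySem.Dict.empty, none)).1.get? v = lastIdx ys v := by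
  induction ys using List.reverseRecOn with
  | nil => simp [lastIdx, PySem.List.enumerate, PySem.Dict.empty, PySem.Dict.get?]
  | append_singleton ys x ih =>
    rw [lastIdx_append]
    simp only [PySem.List.enumerate_append, List.foldl_append, PySem.List.enumerate,
      List.foldl_cons, List.foldl_nil]
    rw [show (stepA ((PySem.List.enumerate ys).foldl stepA (PySem.Dict.empty, none))
        ((0 + ys.length : Int), x)).1
      = ((PySem.List.enumerate ys).foldl stepA (PySem.Dict.empty, none)).1.insert (pyRevInt x)
          ((ys.length : Int)) by simp [stepA]]
    rw [PySem.Dict.get?_insert, ih]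
    by_cases hv : v = pyRevInt x <;> simp [hv] <;> simp [eq_comm] at * <;> simp [hv]

-- the inner rescan of ys computes min(ans, i - lastIdx ys x)
theorem inner_core (ys : List Int) (x i : Int) (ans : Option Int) :
    (PySem.List.pyRange 0 (ys.length : Int)).foldl
      (fun ans j => if pyRevInt (PySem.List.pyGetD ys j 0) = x then pyMinInf ans (i - j) else ans)
      ans
    = match lastIdx ys x with
      | none => ans
      | some j => pyMinInf ans (i - j) := by
  induction ys using List.reverseRecOn generalizing ans with
  | nil => simp [lastIdx, PySem.List.enumerate, PySem.List.pyRange]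
  | append_singleton ys y ih =>
    rw [lastIdx_append]
    have hlen : ((ys ++ [y]).length : Int) = (ys.length : Int) + 1 := by simp
    rw [hlen, PySem.List.pyRange_one_succ_right (by positivity), List.foldl_append]
    have hcong : (PySem.List.pyRange 0 (ys.length : Int)).foldl
        (fun ans j => if pyRevInt (PySem.List.pyGetD (ys ++ [y]) j 0) = x then
          pyMinInf ans (i - j) else ans) ans
      = (PySem.List.pyRange 0 (ys.length : Int)).foldl
        (fun ans j => if pyRevInt (PySem.List.pyGetD ys j 0) = x then
          pyMinInf ans (i - j) else ans) ans := by
      apply PySem.List.foldl_congr_mem'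
      intro j hj acc
      rw [PySem.List.mem_pyRange_one] at hj
      rw [PySem.List.pyGetD_eq_getElem _ _ hj.1 (by simp only [List.length_append, List.length_singleton]; omega),
        PySem.List.pyGetD_eq_getElem _ _ hj.1 (by omega),
        List.getElem_append_left (by omega)]
    rw [hcong, ih]
    have hy : PySem.List.pyGetD (ys ++ [y]) (ys.length : Int) 0 = y := by
      rw [PySem.List.pyGetD_eq_getElem _ _ (by positivity) (by simp)]
      simp
    simp only [List.foldl_cons, List.foldl_nil, hy]
    by_cases hrev : pyRevInt y = x
    · simp only [hrev, if_true]
      cases hlast : lastIdx ys x with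
      | none => simp
      | some j =>
        have := lastIdx_bounds ys x j hlast
        simp only []
        exact pyMinInf_absorb ans _ _ (by omega)
    · simp [hrev]

-- main invariant: A's running answer equals B's outer fold over the same prefix
theorem ans_eq (ys : List Int) :
    ((PySem.List.enumerate ys).foldl stepA (PySem.Dict.empty, none)).2
      = (PySem.List.pyRange 0 (ys.length : Int)).foldl (fun ans i => innerB ys i ans) none := by
  induction ys using List.reverseRecOn with
  | nil => simp [PySem.List.enumerate, PySem.List.pyRange]
  | append_singleton ys x ih =>
    have hlen : ((ys ++ [x]).length : Int) = (ys.length : Int) + 1 := by simp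
    rw [hlen, PySem.List.pyRange_one_succ_right (by positivity), List.foldl_append]
    -- the outer prefix over ys ++ [x] equals B's fold over ys
    have houter : (PySem.List.pyRange 0 (ys.length : Int)).foldl
          (fun ans i => innerB (ys ++ [x]) i ans) none
        = (PySem.List.pyRange 0 (ys.length : Int)).foldl (fun ans i => innerB ys i ans) none := by
      apply PySem.List.foldl_congr_mem'
      intro i hi acc
      rw [PySem.List.mem_pyRange_one] at hi
      unfold innerB
      have hgi : PySem.List.pyGetD (ys ++ [x]) i 0 = PySem.List.pyGetD ys i 0 := by
        rw [PySem.List.pyGetD_eq_getElem _ _ hi.1 (by simp only [List.length_append, List.length_singleton]; omega),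
          PySem.List.pyGetD_eq_getElem _ _ hi.1 (by omega),
          List.getElem_append_left (by omega)]
      rw [hgi]
      apply PySem.List.foldl_congr_mem'
      intro j hj acc'
      rw [PySem.List.mem_pyRange_one] at hj
      rw [PySem.List.pyGetD_eq_getElem _ _ hj.1 (by simp only [List.length_append, List.length_singleton]; omega),
        PySem.List.pyGetD_eq_getElem _ _ hj.1 (by omega),
        List.getElem_append_left (by omega)]
    rw [houter, ← ih]
    -- A side: one more step
    simp only [PySem.List.enumerate_append, List.foldl_append, PySem.List.enumerate,
      List.foldl_cons, List.foldl_nil]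
    -- B side: the last inner scan
    have hx : PySem.List.pyGetD (ys ++ [x]) (ys.length : Int) 0 = x := by
      rw [PySem.List.pyGetD_eq_getElem _ _ (by positivity) (by simp)]
      simp
    have hinner : innerB (ys ++ [x])
          ((ys.length : Int)) (((PySem.List.enumerate ys).foldl stepA (PySem.Dict.empty, none)).2)
        = match lastIdx ys x with
          | none => ((PySem.List.enumerate ys).foldl stepA (PySem.Dict.empty, none)).2
          | some j => pyMinInf (((PySem.List.enumerate ys).foldl stepA (PySem.Dict.empty, none)).2)
              ((ys.length : Int) - j) := by
      unfold innerB
      rw [hx]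
      rw [← inner_core ys x (ys.length : Int)]
      apply PySem.List.foldl_congr_mem'
      intro j hj acc
      rw [PySem.List.mem_pyRange_one] at hj
      rw [PySem.List.pyGetD_eq_getElem _ _ hj.1 (by simp only [List.length_append, List.length_singleton]; omega),
        PySem.List.pyGetD_eq_getElem ys 0 hj.1 (by omega),
        List.getElem_append_left (by omega)]
    rw [show ((0 : Int) + ys.length) = (ys.length : Int) by omega] at *
    rw [hinner]
    have := dictA_spec ys x
    simp only [stepA, this]
    cases lastIdx ys x <;> simp

-- ===== VERDICT (by name: the statement is the Claim_ definition above) =====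
theorem minMirrorPairDistance_spec : Claim_equal_minMirrorPairDistance := by
  intro nums _ _
  unfold Spec_minMirrorPairDistance minMirrorPairDistance minMirrorPairDistance_alt
  rw [ans_eq]
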